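-- pv_equiv track=rewrite | github.com/liuyingxuvka/FlowGuard | flowguard/coverage.py | _sorted_missing
-- ===== SOURCE A (Python) =====
-- from typing import Any, Iterable
--
-- def _sorted_missing(
--     matrix: dict[str, set[str]],
--     required_values: Iterable[str],
-- ) -> tuple[tuple[str, tuple[str, ...]], ...]:
--     required = set(required_values)
--     rows = []
--     for family in sorted(matrix):
--         missing = tuple(sorted(required - matrix[family]))
--         if missing:
--             rows.append((family, missing))
--     return tuple(rows)
-- ===== SOURCE B (Python) =====
-- def _sorted_missing(matrix, required_values):
--     missing_by_family = {family: [] for family in matrix}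
--     for value in sorted(set(required_values)):
--         for family, have in matrix.items():
--             if value not in have:
--                 missing_by_family[family].append(value)
--     return tuple(
--         (family, tuple(missing_by_family[family]))
--         for family in sorted(matrix)
--         if missing_by_family[family]
--     )
-- ===== Notes on version B (the rewrite author's own statement) =====
-- stated objective: alternative
-- what changed: B transposes the computation: it pre-initialises a dict of empty missing-lists, then loops value-major over the globally sorted required set, appending each value to every family that lacks it, and finally emits the non-empty accumulated lists; A loops family-major, computing and sorting a fresh set difference per family.
import Mathlib
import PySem

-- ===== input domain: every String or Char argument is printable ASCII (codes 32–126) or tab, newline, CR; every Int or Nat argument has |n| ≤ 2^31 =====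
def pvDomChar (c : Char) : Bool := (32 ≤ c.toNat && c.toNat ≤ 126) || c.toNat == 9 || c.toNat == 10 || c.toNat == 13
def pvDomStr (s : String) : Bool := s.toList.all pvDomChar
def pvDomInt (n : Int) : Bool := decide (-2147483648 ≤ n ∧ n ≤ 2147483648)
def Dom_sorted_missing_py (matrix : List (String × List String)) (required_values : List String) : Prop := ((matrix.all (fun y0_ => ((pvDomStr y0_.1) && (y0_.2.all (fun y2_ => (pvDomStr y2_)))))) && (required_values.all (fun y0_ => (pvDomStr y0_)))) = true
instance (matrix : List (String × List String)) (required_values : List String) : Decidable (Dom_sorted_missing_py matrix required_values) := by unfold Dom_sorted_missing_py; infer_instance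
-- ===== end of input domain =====

-- B transposes the loops: it accumulates each family's missing list value-by-value over the
-- globally sorted required set, instead of A's per-family set difference + sort; no speed claim.

-- ===== PORT A =====
def sorted_missing_py (matrix : List (String × List String)) (required_values : List String) : List (String × List String) :=
  let required := PySem.Set.ofList required_values
  (PySem.List.sorted (PySem.Dict.keys (PySem.Dict.mk matrix)) (fun k => k) false).foldl
    (fun rows family =>
      let missing := PySem.List.sorted
        (PySem.Set.diff required ((PySem.Dict.mk matrix).getD family [])) (fun v => v) false
      if !missing.isEmpty then rows ++ [(family, missing)] else rows)
    []

-- ===== PORT B =====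
def sorted_missing_py_alt (matrix : List (String × List String)) (required_values : List String) : List (String × List String) :=
  let m := PySem.Dict.mk matrix
  let init : PySem.Dict String (List String) :=
    PySem.Dict.mk (PySem.Dict.keys m |>.map (fun family => (family, ([] : List String))))
  let mbf := (PySem.List.sorted (PySem.Set.ofList required_values) (fun v => v) false).foldl
    (fun d value =>
      m.items.foldl
        (fun d kv => if !kv.2.contains value then d.modify kv.1 [] (fun l => l ++ [value]) else d)
        d)
    init
  (PySem.List.sorted (PySem.Dict.keys m) (fun k => k) false).filterMap
    (fun family =>
      if !(mbf.getD family []).isEmpty then some (family, mbf.getD family []) else none)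

-- ===== PRECONDITION & SPEC =====
-- Pre_: the association-list keys are pairwise distinct — every encoding of a Python dict
-- satisfies this, so no Python input is excluded; duplicate-key lists encode no Python dict.
def Pre_sorted_missing_py (matrix : List (String × List String)) (required_values : List String) : Prop :=
  (matrix.map Prod.fst).Nodup
instance (matrix : List (String × List String)) (required_values : List String) : Decidable (Pre_sorted_missing_py matrix required_values) := by unfold Pre_sorted_missing_py; infer_instance
def pvWitness_sorted_missing_py : (List (String × List String)) × List String :=
  ([("b", ["x"]), ("a", [])], ["y", "x"])
def Spec_sorted_missing_py (matrix : List (String × List String)) (required_values : List String) (out : List (String × List String)) : Prop := out = sorted_missing_py_alt matrix required_values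
instance (matrix : List (String × List String)) (required_values : List String) (out : List (String × List String)) : Decidable (Spec_sorted_missing_py matrix required_values out) := by unfold Spec_sorted_missing_py; infer_instance

-- ===== CLAIM (what is proved, stated in full; the proofs are below) =====
def Claim_equal_sorted_missing_py : Prop := ∀ (matrix : List (String × List String)) (required_values : List String), Dom_sorted_missing_py matrix required_values → Pre_sorted_missing_py matrix required_values → Spec_sorted_missing_py matrix required_values (sorted_missing_py matrix required_values)

-- ===== LEMMAS AND PROOFS =====

-- sorted set-difference = membership filter of the globally sorted required set
lemma sorted_diff_eq_filter_sorted (req fam : List String) :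
    PySem.List.sorted (PySem.Set.diff (PySem.Set.ofList req) fam) (fun v => v) false
      = (PySem.List.sorted (PySem.Set.ofList req) (fun v => v) false).filter
          (fun v => !fam.contains v) := by
  apply PySem.List.sorted_eq_of_perm_of_pairwise_lt
  · exact (PySem.List.sorted_perm (PySem.Set.ofList req) (fun v => v) false).filter _
  · exact (PySem.List.sorted_ofList_pairwise_lt req).filter _

-- the inner loop over the items leaves entries of absent keys untouched
lemma inner_getD_of_not_mem (items : List (String × List String)) (v f : String)
    (d : PySem.Dict String (List String)) (hf : f ∉ items.map Prod.fst) :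
    (items.foldl
        (fun d kv => if !kv.2.contains v then d.modify kv.1 [] (fun l => l ++ [v]) else d)
        d).getD f []
      = d.getD f [] := by
  induction items generalizing d with
  | nil => rfl
  | cons kv rest ih =>
    simp only [List.map_cons, List.mem_cons, not_or] at hf
    simp only [List.foldl_cons]
    rw [ih _ hf.2]
    split
    · exact PySem.Dict.getD_modify_of_ne _ _ _ hf.1
    · rfl

-- one pass of the inner loop appends v to family f's entry iff f's set lacks v
lemma inner_getD (items : List (String × List String)) (v f : String) (hv : List String)
    (d : PySem.Dict String (List String))
    (hnd : (items.map Prod.fst).Nodup) (hmem : (f, hv) ∈ items) :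
    (items.foldl
        (fun d kv => if !kv.2.contains v then d.modify kv.1 [] (fun l => l ++ [v]) else d)
        d).getD f []
      = d.getD f [] ++ (if hv.contains v then [] else [v]) := by
  induction items generalizing d with
  | nil => cases hmem
  | cons kv rest ih =>
    simp only [List.map_cons, List.nodup_cons] at hnd
    rcases List.mem_cons.mp hmem with h | h
    · subst h
      simp only [List.foldl_cons]
      rw [inner_getD_of_not_mem _ _ _ _ hnd.1]
      by_cases hc : v ∈ hv
      · simp [hc]
      · simp [hc, PySem.Dict.getD_modify_self]
    · have hne : kv.1 ≠ f := by
        intro he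
        exact hnd.1 (he ▸ (List.mem_map.mpr ⟨(f, hv), h, rfl⟩))
      simp only [List.foldl_cons]
      rw [ih _ hnd.2 h]
      congr 1
      split
      · exact PySem.Dict.getD_modify_of_ne _ _ _ hne.symm
      · rfl

-- the whole transposed accumulation: f's final entry is the filtered value list
lemma outer_getD (items : List (String × List String)) (f : String) (hv : List String)
    (hnd : (items.map Prod.fst).Nodup) (hmem : (f, hv) ∈ items) :
    ∀ (vs : List String) (d : PySem.Dict String (List String)),
    (vs.foldl
        (fun d v => items.foldl
          (fun d kv => if !kv.2.contains v then d.modify kv.1 [] (fun l => l ++ [v]) else d) d)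
        d).getD f []
      = d.getD f [] ++ vs.filter (fun v => !hv.contains v) := by
  intro vs
  induction vs with
  | nil => intro d; simp
  | cons v vs ih =>
    intro d
    simp only [List.foldl_cons, List.filter_cons]
    rw [ih, inner_getD items v f hv d hnd hmem]
    by_cases hc : v ∈ hv <;> simp [hc]

-- ===== VERDICT (by name: the statement is the Claim_ definition above) =====

-- a comprehension with a guard is the filtered map
lemma filterMap_if {α β : Type} (l : List α) (p : α → Bool) (f : α → β) :
    l.filterMap (fun x => if p x then some (f x) else none) = (l.filter p).map f := by
  induction l with
  | nil => rfl
  | cons x xs ih =>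
    simp only [List.filterMap_cons, List.filter_cons]
    by_cases hp : p x <;> simp [hp, ih]

-- the accumulated entry of family f is the membership filter of the value list
lemma mbf_getD (matrix : List (String × List String)) (vs : List String) (f : String)
    (hnd : (matrix.map Prod.fst).Nodup) (hf : f ∈ matrix.map Prod.fst) :
    (vs.foldl
        (fun d value => matrix.foldl
          (fun d kv => if !kv.2.contains value then d.modify kv.1 [] (fun l => l ++ [value]) else d)
          d)
        (PySem.Dict.mk ((matrix.map Prod.fst).map (fun family => (family, ([] : List String)))))).getD f []
      = vs.filter (fun v => !((PySem.Dict.mk matrix).getD f []).contains v) := by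
  obtain ⟨⟨f', hv⟩, hmem, heq⟩ := List.mem_map.mp hf
  cases heq
  have hkeys : (PySem.Dict.mk matrix).keys = matrix.map Prod.fst := by
    simp [PySem.Dict.keys_mk]
  have hget : (PySem.Dict.mk matrix).getD f' [] = hv :=
    PySem.Dict.getD_of_mem_items (PySem.Dict.mk matrix) hmem (by rw [hkeys]; exact hnd) []
  have hinitk : ((PySem.Dict.mk ((matrix.map Prod.fst).map
      (fun family => (family, ([] : List String))))).keys).Nodup := by
    simpa [PySem.Dict.keys_mk, List.map_map, Function.comp_def] using hnd
  have hinit : (PySem.Dict.mk ((matrix.map Prod.fst).map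
      (fun family => (family, ([] : List String))))).getD f' [] = [] :=
    PySem.Dict.getD_of_mem_items _
      (show (f', ([] : List String)) ∈ ((matrix.map Prod.fst).map
        (fun family => (family, ([] : List String)))) from List.mem_map.mpr ⟨f', hf, rfl⟩)
      hinitk []
  rw [outer_getD matrix f' hv hnd hmem vs, hinit, hget, List.nil_append]

theorem sorted_missing_py_spec : Claim_equal_sorted_missing_py := by
  intro matrix req _ hpre
  unfold Spec_sorted_missing_py sorted_missing_py sorted_missing_py_alt
  simp only [PySem.Dict.keys_mk]
  rw [PySem.List.foldl_append_if
    (p := fun family => !(PySem.List.sorted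
      (PySem.Set.diff (PySem.Set.ofList req) ((PySem.Dict.mk matrix).getD family []))
      (fun v => v) false).isEmpty)
    (f := fun family => (family, PySem.List.sorted
      (PySem.Set.diff (PySem.Set.ofList req) ((PySem.Dict.mk matrix).getD family []))
      (fun v => v) false))]
  rw [List.nil_append]
  rw [List.filterMap_congr (g := fun family =>
      if !(PySem.List.sorted
        (PySem.Set.diff (PySem.Set.ofList req) ((PySem.Dict.mk matrix).getD family []))
        (fun v => v) false).isEmpty then
        some (family, PySem.List.sorted
          (PySem.Set.diff (PySem.Set.ofList req) ((PySem.Dict.mk matrix).getD family []))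
          (fun v => v) false)
      else none)
    (fun x hx => by
      have hxk : x ∈ matrix.map Prod.fst := by
        rw [PySem.List.mem_sorted] at hx
        simpa using hx
      rw [mbf_getD matrix _ x hpre hxk, ← sorted_diff_eq_filter_sorted])]
  rw [filterMap_if]
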